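-- pv_equiv track=rewrite | github.com/yoonthegoon/LeetCode | problems/0001-0050/03.py | count_non_repeating
-- ===== SOURCE A (Python) =====
-- def count_non_repeating(s: str) -> int:
--     count = 0
--     visited_characters = {}
--     for character in s:
--         if visited_characters.get(character):
--             break
--         count += 1
--         visited_characters[character] = True
--     return count
-- ===== SOURCE B (Python) =====
-- def count_non_repeating(s: str) -> int:
--     # Fold the string from the right: ans for a suffix c+rest is
--     # 1 + min(ans(rest), position of the next occurrence of c in rest).
--     ans = 0
--     for i in reversed(range(len(s))):
--         pos = s[i + 1:].find(s[i])
--         ans = 1 + (ans if pos < 0 else min(ans, pos))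
--     return ans
-- ===== Notes on version B (the rewrite author's own statement) =====
-- stated objective: alternative
-- what changed: Replaces A's forward scan with a seen-dict by a right-to-left fold: for each index i it computes the distance to the next occurrence of s[i] in the tail s[i+1:] and combines it with the suffix answer via a min recurrence (ans = 1 + min(ans(suffix), next-occurrence distance)).
import Mathlib
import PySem

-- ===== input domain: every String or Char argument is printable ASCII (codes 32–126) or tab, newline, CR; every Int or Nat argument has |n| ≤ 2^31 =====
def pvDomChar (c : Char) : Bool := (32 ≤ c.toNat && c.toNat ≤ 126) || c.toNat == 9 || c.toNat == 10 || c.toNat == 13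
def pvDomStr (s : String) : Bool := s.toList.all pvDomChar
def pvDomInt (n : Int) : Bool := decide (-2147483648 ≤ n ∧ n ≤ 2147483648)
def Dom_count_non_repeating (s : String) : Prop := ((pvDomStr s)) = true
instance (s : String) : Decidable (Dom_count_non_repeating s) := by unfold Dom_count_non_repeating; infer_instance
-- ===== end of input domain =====

-- B folds the string from the right with a min-recurrence over next-occurrence distances,
-- instead of A's forward scan with a seen-dict (alternative decomposition, not faster).

-- ===== PORT A =====
-- the 'for character in s' loop with its count and visited dict
def cnrLoopA : List Char → Int → PySem.Dict Char Bool → Int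
  | [], count, _ => count
  | c :: rest, count, d =>
    if PySem.Dict.getD d c false then count
    else cnrLoopA rest (count + 1) (PySem.Dict.insert d c true)

def count_non_repeating (s : String) : Int :=
  cnrLoopA s.toList 0 PySem.Dict.empty

-- ===== PORT B =====
-- body of 'for i in reversed(range(len(s)))': pos = s[i+1:].find(s[i]); ans = 1 + (ans if pos < 0 else min(ans, pos))
def cnrStep (cs : List Char) (ans : Int) (i : Int) : Int :=
  let pos := PySem.Chars.find (PySem.List.slice cs (some (i + 1)) none) [PySem.List.pyGetD cs i ' ']
  1 + (if pos < 0 then ans else min ans pos)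

def count_non_repeating_alt (s : String) : Int :=
  ((PySem.List.pyRange 0 (s.toList.length : Int)).reverse).foldl (cnrStep s.toList) 0

-- ===== PRECONDITION & SPEC =====
def Spec_count_non_repeating (s : String) (out : Int) : Prop := out = count_non_repeating_alt s
instance (s : String) (out : Int) : Decidable (Spec_count_non_repeating s out) := by unfold Spec_count_non_repeating; infer_instance

-- ===== CLAIM (what is proved, stated in full; the proofs are below) =====
def Claim_equal_count_non_repeating : Prop := ∀ (s : String), Dom_count_non_repeating s → Spec_count_non_repeating s (count_non_repeating s)

-- ===== LEMMAS AND PROOFS =====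

-- B's right-fold value on a suffix, as a recursive function
def Lfun : List Char → Int
  | [] => 0
  | c :: r =>
    let pos := PySem.Chars.find r [c]
    1 + (if pos < 0 then Lfun r else min (Lfun r) pos)

-- A's loop abstracted: the dict is the set 'seen'
def auxA : List Char → List Char → Int
  | _, [] => 0
  | seen, c :: r => if c ∈ seen then 0 else 1 + auxA (c :: seen) r

theorem auxA_nonneg (cs seen : List Char) : 0 ≤ auxA seen cs := by
  induction cs generalizing seen with
  | nil => simp [auxA]
  | cons c r ih => simp only [auxA]; split_ifs <;> [omega; exact by have := ih (c :: seen); omega]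

theorem auxA_perm (cs : List Char) : ∀ s1 s2 : List Char, (∀ a, a ∈ s1 ↔ a ∈ s2) → auxA s1 cs = auxA s2 cs := by
  induction cs with
  | nil => intros; rfl
  | cons c r ih =>
    intro s1 s2 h
    simp only [auxA, h c]
    split_ifs with hm
    · rfl
    · have := ih (c :: s1) (c :: s2) (by intro a; simp [h a])
      omega

-- Python's tail.find(c) for a single character is the first index of c (or -1)
theorem find_single (r : List Char) (c : Char) :
    PySem.Chars.find r [c] = (List.idxOf? c r).elim (-1) (fun k => (k : Int)) := by
  cases h : List.idxOf? c r with
  | none =>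
    have hnm : c ∉ r := List.idxOf?_eq_none_iff.mp h
    have : ¬ ([c] <:+: r) := by
      intro hinf
      exact hnm (hinf.mem (by simp))
    simp [Option.elim, (PySem.Chars.find_eq_neg_one_iff r [c]).mpr this]
  | some k =>
    obtain ⟨hklen, hkc, hkmin⟩ := List.idxOf?_eq_some_iff.mp h
    have hinf : [c] <:+: r := by
      refine ⟨r.take k, r.drop (k+1), ?_⟩
      rw [← hkc]
      simp
    have hge : 0 ≤ PySem.Chars.find r [c] := (PySem.Chars.find_nonneg_iff r [c]).mpr hinf
    obtain ⟨hpref, hmin⟩ := PySem.Chars.find_spec hge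
    set f := (PySem.Chars.find r [c]).toNat with hf
    have hfc : r[f]? = some c := by
      obtain ⟨t, ht⟩ := hpref
      have h0 : (List.drop f r)[0]? = some c := by rw [← ht]; simp
      simpa using h0
    have hk_pref : [c] <+: List.drop k r := by
      rw [List.drop_eq_getElem_cons hklen, hkc]
      exact ⟨_, rfl⟩
    have hfk : f ≤ k := by
      by_contra hlt
      exact hmin k (by omega) hk_pref
    have hflen : f < r.length := (List.getElem?_eq_some_iff.mp hfc).1
    have hfc' : r[f] = c := (List.getElem?_eq_some_iff.mp hfc).2
    have hkf : k ≤ f := by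
      by_contra hlt
      exact hkmin f (by omega) hfc'
    have hfk2 : f = k := by omega
    simp only [Option.elim, ← hfk2, hf]
    exact (Int.toNat_of_nonneg hge).symm

-- inserting c into 'seen' caps auxA at the first later occurrence of c
theorem auxA_insert (r : List Char) : ∀ seen c, c ∉ seen →
    auxA (c :: seen) r = (List.idxOf? c r).elim (auxA seen r) (fun k => min (auxA seen r) (k : Int)) := by
  induction r with
  | nil => intro seen c _; simp [auxA]
  | cons x r' ih =>
    intro seen c hc
    by_cases hxs : x ∈ seen
    · have h0 : auxA seen (x :: r') = 0 := by simp [auxA, hxs]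
      have hx : x ∈ c :: seen := by simp [hxs]
      have h1 : auxA (c :: seen) (x :: r') = 0 := by simp [auxA, hx]
      cases h : List.idxOf? c (x :: r') with
      | none => simp [h1, h0, Option.elim]
      | some k =>
        have hk0 : (0:Int) ≤ k := by positivity
        simp only [h1, h0, Option.elim]
        omega
    · by_cases hxc : x = c
      · subst hxc
        have h1 : auxA (x :: seen) (x :: r') = 0 := by simp [auxA]
        have h2 : List.idxOf? x (x :: r') = some 0 := by simp [List.idxOf?_cons]
        have h3 := auxA_nonneg (x :: r') seen
        simp [h1, h2, Option.elim]
        omega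
      · have hL : auxA (c :: seen) (x :: r') = 1 + auxA (c :: x :: seen) r' := by
          have hx : x ∉ c :: seen := by simp only [List.mem_cons]; push Not; exact ⟨hxc, hxs⟩
          rw [show auxA (c :: seen) (x :: r') = if x ∈ c :: seen then 0 else 1 + auxA (x :: c :: seen) r' from rfl]
          rw [if_neg hx, auxA_perm r' (x :: c :: seen) (c :: x :: seen) (by intro a; simp; tauto)]
        have hR : auxA seen (x :: r') = 1 + auxA (x :: seen) r' := by
          simp [auxA, hxs]
        have hcx : c ∉ x :: seen := by simp only [List.mem_cons]; push Not; exact ⟨fun h => hxc h.symm, hc⟩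
        have hidx : List.idxOf? c (x :: r') = (List.idxOf? c r').map (· + 1) := by
          simp [List.idxOf?_cons, hxc]
        rw [hL, ih (x :: seen) c hcx, hR, hidx]
        cases List.idxOf? c r' with
        | none => simp [Option.elim]
        | some k => simp [Option.elim]; omega

theorem auxA_nil_eq_Lfun (cs : List Char) : auxA [] cs = Lfun cs := by
  induction cs with
  | nil => rfl
  | cons c r ih =>
    have h0 : auxA [] (c :: r) = 1 + auxA [c] r := by simp [auxA]
    rw [h0, auxA_insert r [] c (by simp), ih, Lfun, find_single]
    cases h : List.idxOf? c r with
    | none => simp [Option.elim]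
    | some k =>
      have hk0 : (0:Int) ≤ k := by positivity
      simp only [Option.elim]
      rw [if_neg (by omega)]

-- A's loop with the dict read off as a set
theorem cnrLoopA_eq (cs : List Char) : ∀ (count : Int) (d : PySem.Dict Char Bool) (seen : List Char),
    (∀ c, PySem.Dict.getD d c false = decide (c ∈ seen)) →
    cnrLoopA cs count d = count + auxA seen cs := by
  induction cs with
  | nil => intro count d seen _; simp [cnrLoopA, auxA]
  | cons c r ih =>
    intro count d seen hd
    simp only [cnrLoopA, auxA, hd c]
    by_cases hm : c ∈ seen
    · simp [hm]
    · simp only [hm, decide_false, Bool.false_eq_true, if_false]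
      rw [ih (count + 1) (PySem.Dict.insert d c true) (c :: seen) ?_]
      · omega
      · intro c'
        rw [PySem.Dict.getD_insert]
        by_cases hc : c' = c <;> simp [hc, hd c']

-- B's fold step at index k is exactly Lfun's recurrence
theorem cnrStep_eq (cs : List Char) (k : Nat) (hk : k < cs.length) :
    cnrStep cs (Lfun (cs.drop (k + 1))) (k : Int) = Lfun (cs.drop k) := by
  have hdk : cs.drop k = cs[k] :: cs.drop (k + 1) := List.drop_eq_getElem_cons hk
  have hget : PySem.List.pyGetD cs (k : Int) ' ' = cs[k] := by
    rw [PySem.List.pyGetD_natCast, List.getD_eq_getElem cs ' ' hk]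
  have hslice : PySem.List.slice cs (some ((k : Int) + 1)) none = cs.drop (k + 1) := by
    have : ((k : Int) + 1) = ((k + 1 : Nat) : Int) := by omega
    rw [this, PySem.List.slice_from_natCast]
  rw [hdk]
  simp only [cnrStep, hget, hslice, Lfun]

theorem foldB (cs : List Char) : ∀ k, k ≤ cs.length →
    ((List.range k).map (fun i : Nat => (i : Int))).reverse.foldl (cnrStep cs) (Lfun (cs.drop k)) = Lfun cs := by
  intro k
  induction k with
  | zero => intro _; simp
  | succ k ih =>
    intro hk
    rw [List.range_succ]
    simp only [List.map_append, List.reverse_append, List.map_cons, List.map_nil,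
      List.reverse_cons, List.reverse_nil, List.nil_append, List.cons_append, List.foldl_cons]
    rw [cnrStep_eq cs k (by omega)]
    exact ih (by omega)

-- ===== VERDICT (by name: the statement is the Claim_ definition above) =====
theorem count_non_repeating_spec : Claim_equal_count_non_repeating := by
  intro s _
  unfold Spec_count_non_repeating count_non_repeating count_non_repeating_alt
  rw [PySem.List.pyRange_zero_natCast]
  have hA := cnrLoopA_eq s.toList 0 PySem.Dict.empty [] (by intro c; simp [PySem.Dict.getD_empty])
  have hB := foldB s.toList s.toList.length (le_refl _)
  rw [List.drop_length] at hB
  rw [hA, auxA_nil_eq_Lfun, zero_add, ← hB]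
  rfl
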